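-- pv_equiv track=rewrite | github.com/axieax/planner | plan.py | plan_info
-- ===== SOURCE A (Python) =====
-- def plan_info(plan):
--     ''' Returns a dictionary of info regarding the plan '''
--     # find finishing term - first term from end that is non-empty
--     finish_index = len(plan) - 1
--     while not plan[finish_index]:
--         finish_index -= 1
--     # find starting term and study duration
--     total_study_terms = 0
--     start_index = finish_index
--     for term_index, term_courses in enumerate(plan[:finish_index + 1]):
--         if term_courses:
--             start_index = min(start_index, term_index)
--             total_study_terms += 1
--
--     return {
--         'start_index': start_index,
--         'finish_index': finish_index,
--         'total_study_terms': total_study_terms,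
--         'total_duration': finish_index - start_index + 1,
--     }
-- ===== SOURCE B (Python) =====
-- def plan_info(plan):
--     ''' Returns a dictionary of info regarding the plan '''
--     idx = [i for i, term_courses in enumerate(plan) if term_courses]
--     return {
--         'start_index': idx[0],
--         'finish_index': idx[-1],
--         'total_study_terms': len(idx),
--         'total_duration': idx[-1] - idx[0] + 1,
--     }
-- ===== Notes on version B (the rewrite author's own statement) =====
-- stated objective: simpler
-- what changed: One forward pass materializes the list of non-empty term indices; start/finish/count/duration are read off its ends and length, replacing A's backward while-scan plus forward min-tracking fold.
import Mathlib
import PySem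

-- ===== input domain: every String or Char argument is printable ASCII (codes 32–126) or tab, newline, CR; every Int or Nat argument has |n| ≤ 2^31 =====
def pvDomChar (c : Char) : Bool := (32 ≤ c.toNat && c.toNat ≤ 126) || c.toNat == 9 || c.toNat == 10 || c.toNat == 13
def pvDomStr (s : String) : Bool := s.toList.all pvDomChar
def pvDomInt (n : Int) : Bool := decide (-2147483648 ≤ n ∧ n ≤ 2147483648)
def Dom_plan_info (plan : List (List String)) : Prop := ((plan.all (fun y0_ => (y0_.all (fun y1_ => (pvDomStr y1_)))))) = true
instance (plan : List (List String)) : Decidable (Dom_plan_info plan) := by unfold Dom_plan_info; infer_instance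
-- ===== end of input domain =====

-- B builds the list of non-empty term indices in one forward pass and reads start/finish/count/duration
-- off its ends and length, replacing A's backward while-scan plus forward min-tracking loop (objective: simpler).

-- ===== PORT A =====
-- A's `while not plan[finish_index]: finish_index -= 1`, fuel-bounded; pyGet? = none is Python's
-- IndexError after the negative indices wrap past -len (excluded by Pre_; we then return fi arbitrarily).
def planInfoWhile (plan : List (List String)) : Nat → Int → Int
  | 0, fi => fi
  | fuel + 1, fi =>
    match PySem.List.pyGet? plan fi with
    | none => fi
    | some t => if t = [] then planInfoWhile plan fuel (fi - 1) else fi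

def plan_info (plan : List (List String)) : List (String × Int) :=
  let finish_index := planInfoWhile plan (2 * plan.length + 2) ((plan.length : Int) - 1)
  let st := (PySem.List.enumerate (PySem.List.slice plan none (some (finish_index + 1))) 0).foldl
    (fun (st : Int × Int) tc =>
      if tc.2 ≠ [] then (min st.1 tc.1, st.2 + 1) else st)
    (finish_index, 0)
  [("start_index", st.1), ("finish_index", finish_index),
   ("total_study_terms", st.2), ("total_duration", finish_index - st.1 + 1)]

-- ===== PORT B =====
def plan_info_alt (plan : List (List String)) : List (String × Int) :=
  let idx := ((PySem.List.enumerate plan 0).filter (fun p => !p.2.isEmpty)).map Prod.fst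
  match PySem.List.pyGet? idx 0, PySem.List.pyGet? idx (-1) with
  | some s, some f =>
      [("start_index", s), ("finish_index", f),
       ("total_study_terms", (idx.length : Int)), ("total_duration", f - s + 1)]
  | _, _ => []

-- ===== PRECONDITION & SPEC =====
-- Pre_ excludes exactly the plans whose every term is empty: there A's backward scan wraps past the
-- start of the list and raises IndexError, and B's idx[0] raises IndexError too.
def Pre_plan_info (plan : List (List String)) : Prop := ∃ t ∈ plan, t ≠ []
instance (plan : List (List String)) : Decidable (Pre_plan_info plan) := by unfold Pre_plan_info; infer_instance
def pvWitness_plan_info : List (List String) := [[], ["COMP1511"], [], ["COMP2521", "MATH1081"], []]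

def Spec_plan_info (plan : List (List String)) (out : List (String × Int)) : Prop := out = plan_info_alt plan
instance (plan : List (List String)) (out : List (String × Int)) : Decidable (Spec_plan_info plan out) := by unfold Spec_plan_info; infer_instance

-- ===== CLAIM (what is proved, stated in full; the proofs are below) =====
def Claim_equal_plan_info : Prop := ∀ (plan : List (List String)), Dom_plan_info plan → Pre_plan_info plan → Spec_plan_info plan (plan_info plan)

-- ===== LEMMAS AND PROOFS =====
def neIdx (plan : List (List String)) : List Int :=
  ((PySem.List.enumerate plan 0).filter (fun p => !p.2.isEmpty)).map Prod.fst

theorem neIdx_mem (plan : List (List String)) (i : Int) :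
    i ∈ neIdx plan ↔ ∃ (k : Nat) (h : k < plan.length), i = (k : Int) ∧ plan[k] ≠ [] := by
  simp [neIdx, List.mem_filter, PySem.List.mem_enumerate_iff]

theorem neIdx_sorted (plan : List (List String)) : (neIdx plan).Pairwise (· < ·) := by
  have h1 := PySem.List.pairwise_lt_enumerate (xs := plan) (s := 0)
  exact (h1.filter _).map _ (fun a b h => h)

theorem neIdx_ne_nil (plan : List (List String)) (h : ∃ t ∈ plan, t ≠ []) : neIdx plan ≠ [] := by
  rcases h with ⟨t, ht, hne⟩
  rcases List.mem_iff_getElem.mp ht with ⟨k, hk, rfl⟩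
  intro hnil
  have : (k : Int) ∈ neIdx plan := (neIdx_mem plan k).mpr ⟨k, hk, rfl, hne⟩
  simp [hnil] at this

-- sorted order lemmas

theorem pw_head_le {l : List Int} (hl : l.Pairwise (· < ·)) {x : Int} (hx : x ∈ l) (h : l ≠ []) :
    l.head h ≤ x := by
  cases l with
  | nil => simp at hx
  | cons a t =>
    rcases List.mem_cons.mp hx with rfl | hx
    · simp
    · exact le_of_lt ((List.pairwise_cons.mp hl).1 x hx)

theorem pw_le_getLast {l : List Int} (hl : l.Pairwise (· < ·)) {x : Int} (hx : x ∈ l) (h : l ≠ []) :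
    x ≤ l.getLast h := by
  induction l with
  | nil => simp at hx
  | cons a t ih =>
    cases t with
    | nil => simp_all
    | cons b u =>
      rcases List.mem_cons.mp hx with rfl | hx
      · have hbl : x < b := (List.pairwise_cons.mp hl).1 b (by simp)
        calc x ≤ b := le_of_lt hbl
          _ ≤ (b :: u).getLast (by simp) := pw_head_le (List.pairwise_cons.mp hl).2 (by simp) (by simp)
          _ = (x :: b :: u).getLast (by simp) := (List.getLast_cons (by simp)).symm
      · rw [List.getLast_cons (by simp)]
        exact ih (List.pairwise_cons.mp hl).2 hx (by simp)

theorem foldl_min_of_le {l : List Int} {b : Int} (h : ∀ y ∈ l, b ≤ y) : l.foldl min b = b := by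
  induction l with
  | nil => rfl
  | cons a t ih =>
    simp only [List.foldl_cons, min_eq_left (h a (by simp))]
    exact ih (fun y hy => h y (by simp [hy]))

theorem foldl_min_sorted {l : List Int} (hl : l.Pairwise (· < ·)) (h : l ≠ []) (a : Int) :
    l.foldl min a = min a (l.head h) := by
  cases l with
  | nil => simp at h
  | cons x t =>
    simp only [List.foldl_cons, List.head_cons]
    exact foldl_min_of_le (fun y hy =>
      le_trans (min_le_right a x) (le_of_lt ((List.pairwise_cons.mp hl).1 y hy)))

theorem scan_eq (plan : List (List String)) (g : Int) (h0 : 0 ≤ g) (hg : g < plan.length)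
    (hne : plan[g.toNat]'(by omega) ≠ [])
    (hmax : ∀ (k : Nat) (hk : k < plan.length), g < (k : Int) → plan[k] = []) :
    ∀ (fuel : Nat) (fi : Int), g ≤ fi → fi < plan.length → (fi - g).toNat < fuel →
      planInfoWhile plan fuel fi = g := by
  intro fuel
  induction fuel with
  | zero => intro fi _ _ hf; omega
  | succ n ih =>
    intro fi hge hlt hf
    have h0f : 0 ≤ fi := le_trans h0 hge
    have hget : PySem.List.pyGet? plan fi = some (plan[fi.toNat]'(by omega)) := by
      rw [PySem.List.pyGet?_of_nonneg plan h0f]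
      exact List.getElem?_eq_getElem (by omega)
    rw [planInfoWhile, hget]
    rcases eq_or_lt_of_le hge with rfl | hlt2
    · simp [hne]
    · have hk : plan[fi.toNat]'(by omega) = [] := by
        have := hmax fi.toNat (by omega) (by omega)
        simpa using this
      simp only [hk, if_pos]
      exact ih (fi - 1) (by omega) (by omega) (by omega)

-- the fold over an enumerated list, characterized via the filtered index table

theorem fold_char (xs : List (List String)) : ∀ (s : Int) (acc : Int × Int),
    (PySem.List.enumerate xs s).foldl
      (fun (st : Int × Int) tc => if tc.2 ≠ [] then (min st.1 tc.1, st.2 + 1) else st) acc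
    = ((((PySem.List.enumerate xs s).filter (fun p => !p.2.isEmpty)).map Prod.fst).foldl min acc.1,
       acc.2 + (((PySem.List.enumerate xs s).filter (fun p => !p.2.isEmpty)).length : Int)) := by
  induction xs with
  | nil => intro s acc; simp [PySem.List.enumerate_nil]
  | cons x t ih =>
    intro s acc
    rw [PySem.List.enumerate_cons, List.foldl_cons, ih, List.filter_cons]
    by_cases hx : x = []
    · simp [hx]
    · simp [hx]
      omega

theorem neIdx_take (plan : List (List String)) (n : Nat)
    (h : ∀ (j : Nat) (hj : j < plan.length), n ≤ j → plan[j] = []) :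
    neIdx (plan.take n) = neIdx plan := by
  unfold neIdx
  conv_rhs => rw [← List.take_append_drop n plan]
  rw [PySem.List.enumerate_append, List.filter_append]
  have hdrop : ((PySem.List.enumerate (plan.drop n) (0 + (plan.take n).length)).filter
      (fun p => !p.2.isEmpty)) = [] := by
    rw [List.filter_eq_nil_iff]
    intro p hp
    rw [PySem.List.mem_enumerate_iff] at hp
    rcases hp with ⟨k, hk, rfl⟩
    have hlen : k < plan.length - n := by simpa using hk
    have : (plan.drop n)[k] = plan[n + k]'(by omega) := by
      simp [List.getElem_drop]
    simp [this, h (n + k) (by omega) (by omega)]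
  rw [hdrop, List.append_nil]

theorem main_eq (plan : List (List String)) (hpre : ∃ t ∈ plan, t ≠ []) :
    plan_info plan = plan_info_alt plan := by
  have hnil := neIdx_ne_nil plan hpre
  have hsort := neIdx_sorted plan
  set I := neIdx plan with hI
  have hgmem : I.getLast hnil ∈ I := List.getLast_mem hnil
  set g := I.getLast hnil with hgdef
  rw [neIdx_mem] at hgmem
  obtain ⟨k, hk, hgk, hkne⟩ := hgmem
  have hmax : ∀ (j : Nat) (hj : j < plan.length), g < (j : Int) → plan[j] = [] := by
    intro j hj hgj
    by_contra hne2
    have hjmem : (j : Int) ∈ I := (neIdx_mem plan j).mpr ⟨j, hj, rfl, hne2⟩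
    have := pw_le_getLast hsort hjmem hnil
    omega
  have hgne : plan[g.toNat]'(by omega) ≠ [] := by
    have h1 : plan[g.toNat]'(by omega) = plan[k] := by congr 1; omega
    rw [h1]; exact hkne
  -- the backward while-scan finds g
  have hwhile : planInfoWhile plan (2 * plan.length + 2) ((plan.length : Int) - 1) = g := by
    apply scan_eq plan g (by omega) (by omega) hgne hmax
    · omega
    · omega
    · omega
  -- the slice is take (k+1)
  have hslice : PySem.List.slice plan none (some (g + 1)) = plan.take (k + 1) := by
    rw [show g + 1 = ((k + 1 : Nat) : Int) by omega, PySem.List.slice_to_natCast]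
  have htake : neIdx (plan.take (k + 1)) = I :=
    neIdx_take plan (k + 1) (fun j hj hle => hmax j hj (by omega))
  have hhead : I.head hnil ≤ g := pw_le_getLast hsort (List.head_mem hnil) hnil
  have hfold := fold_char (plan.take (k + 1)) 0 (g, 0)
  rw [show (((PySem.List.enumerate (plan.take (k+1)) 0).filter (fun p => !p.2.isEmpty)).map Prod.fst) = I from htake] at hfold
  have hb0 : PySem.List.pyGet? I 0 = some (I.head hnil) := by
    rw [PySem.List.pyGet?_zero, ← List.head?_eq_getElem?, List.head?_eq_some_head hnil]
  have hb1 : PySem.List.pyGet? I (-1) = some g := by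
    rw [PySem.List.pyGet?_neg_one, List.getLast?_eq_some_getLast hnil]
  have hmin : I.foldl min g = I.head hnil := by
    rw [foldl_min_sorted hsort hnil g, min_eq_right hhead]
  have hfoldB : ((PySem.List.enumerate plan 0).filter (fun p => !p.2.isEmpty)).map Prod.fst = I := rfl
  unfold plan_info plan_info_alt
  simp only [hwhile, hslice, hfold, hfoldB, hb0, hb1, hmin]
  simp
  rw [← htake]
  simp [neIdx]

-- ===== VERDICT (by name: the statement is the Claim_ definition above) =====
theorem plan_info_spec : Claim_equal_plan_info := by
  intro plan _ hpre
  unfold Spec_plan_info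
  exact main_eq plan hpre
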